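-- pv_equiv track=rewrite | github.com/tomastc/Memoria_de_Titulo | 01 Codigos utilizados/04 Codigos_extras (Lc y hc)/02 Estimación hc canal - cada mes.py | encontrar_intervalos
-- ===== SOURCE A (Python) =====
-- def encontrar_intervalos(estado):
--     """
--     Encuentra índices de inicio y fin de cada segmento continuo donde estado == 1.
--     Retorna lista de tuplas (inicio, fin) con índices inclusivos.
--     """
--     intervalos = []
--     i = 0
--     n = len(estado)
--     while i < n:
--         if estado[i] == 1:
--             inicio = i
--             while i < n and estado[i] == 1:
--                 i += 1
--             fin = i - 1
--             intervalos.append((inicio, fin))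
--         else:
--             i += 1
--     return intervalos
-- ===== SOURCE B (Python) =====
-- def encontrar_intervalos(estado):
--     """Boundary detection: collect run starts and run ends by comparing each
--     position with its neighbour, then zip the two lists into intervals."""
--     n = len(estado)
--     inicios = [i for i in range(n) if estado[i] == 1 and (i == 0 or estado[i - 1] != 1)]
--     fines = [i for i in range(n) if estado[i] == 1 and (i == n - 1 or estado[i + 1] != 1)]
--     return list(zip(inicios, fines))
-- ===== Notes on version B (the rewrite author's own statement) =====
-- stated objective: alternative
-- what changed: Replaced A's stateful nested-while consuming scan by declarative boundary detection: two comprehensions pick out run starts (a 1 whose left neighbour is not 1) and run ends (a 1 whose right neighbour is not 1), and zip pairs them into intervals.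
import Mathlib
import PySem

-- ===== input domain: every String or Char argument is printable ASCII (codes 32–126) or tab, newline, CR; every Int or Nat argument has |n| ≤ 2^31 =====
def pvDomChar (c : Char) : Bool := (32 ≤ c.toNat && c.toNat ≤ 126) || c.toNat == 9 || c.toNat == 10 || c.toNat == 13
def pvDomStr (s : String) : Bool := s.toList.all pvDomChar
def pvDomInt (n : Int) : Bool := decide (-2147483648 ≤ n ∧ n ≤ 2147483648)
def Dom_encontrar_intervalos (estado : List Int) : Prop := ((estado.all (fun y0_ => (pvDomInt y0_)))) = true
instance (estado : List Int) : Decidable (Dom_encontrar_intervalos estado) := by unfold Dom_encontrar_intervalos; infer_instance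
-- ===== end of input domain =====

-- B replaces A's stateful nested-while scan by boundary detection (run starts and run
-- ends found by neighbour comparison, zipped together); objective: alternative.

-- ===== PORT A =====
-- inner while loop of A: advance i while i < n and estado[i] == 1
def scanA (estado : List Int) (i : Nat) : Nat :=
  if _h : i < estado.length ∧ PySem.List.pyGetD estado (i : Int) 0 = 1 then
    scanA estado (i + 1)
  else i
termination_by estado.length - i

theorem le_scanA (estado : List Int) (i : Nat) : i ≤ scanA estado i := by
  rw [scanA]
  split
  · exact le_trans (Nat.le_succ i) (le_scanA estado (i + 1))
  · exact le_refl i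
termination_by estado.length - i
decreasing_by simp_all; omega

theorem scanA_gt (estado : List Int) (i : Nat)
    (h : i < estado.length ∧ PySem.List.pyGetD estado (i : Int) 0 = 1) :
    i < scanA estado i := by
  rw [scanA]; simp [h]; exact Nat.lt_of_lt_of_le (Nat.lt_succ_self i) (le_scanA estado (i + 1))

-- outer while loop of A
def loopA (estado : List Int) (i : Nat) (acc : List (Int × Int)) : List (Int × Int) :=
  if h : i < estado.length then
    if h1 : PySem.List.pyGetD estado (i : Int) 0 = 1 then
      let j := scanA estado i
      loopA estado j (acc ++ [((i : Int), (j : Int) - 1)])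
    else loopA estado (i + 1) acc
  else acc
termination_by estado.length - i
decreasing_by
  · have := scanA_gt estado i ⟨h, h1⟩; omega
  · omega

def encontrar_intervalos (estado : List Int) : List (Int × Int) :=
  loopA estado 0 []

-- ===== PORT B =====
-- condition of B's first comprehension: estado[i] == 1 and (i == 0 or estado[i-1] != 1)
def condS (estado : List Int) (i : Int) : Bool :=
  (PySem.List.pyGetD estado i 0 == 1) && (i == 0 || PySem.List.pyGetD estado (i - 1) 0 != 1)

-- condition of B's second comprehension: estado[i] == 1 and (i == n-1 or estado[i+1] != 1)
def condE (estado : List Int) (n : Int) (i : Int) : Bool :=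
  (PySem.List.pyGetD estado i 0 == 1) && (i == n - 1 || PySem.List.pyGetD estado (i + 1) 0 != 1)

def encontrar_intervalos_alt (estado : List Int) : List (Int × Int) :=
  let n : Int := estado.length
  let inicios := (PySem.List.pyRange 0 n 1).filter (condS estado)
  let fines := (PySem.List.pyRange 0 n 1).filter (condE estado n)
  inicios.zip fines

-- ===== PRECONDITION & SPEC =====
def Spec_encontrar_intervalos (estado : List Int) (out : List (Int × Int)) : Prop := out = encontrar_intervalos_alt estado
instance (estado : List Int) (out : List (Int × Int)) : Decidable (Spec_encontrar_intervalos estado out) := by unfold Spec_encontrar_intervalos; infer_instance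

-- ===== CLAIM (what is proved, stated in full; the proofs are below) =====
def Claim_equal_encontrar_intervalos : Prop := ∀ (estado : List Int), Dom_encontrar_intervalos estado → Spec_encontrar_intervalos estado (encontrar_intervalos estado)

-- ===== LEMMAS AND PROOFS =====

-- suffix of B's start list from position i
def SL (estado : List Int) (i : Nat) : List Int :=
  (PySem.List.pyRange (i : Int) (estado.length : Int) 1).filter (condS estado)

-- suffix of B's end list from position i
def EL (estado : List Int) (i : Nat) : List Int :=
  (PySem.List.pyRange (i : Int) (estado.length : Int) 1).filter (condE estado (estado.length : Int))

theorem scanA_le (estado : List Int) (i : Nat) (h : i ≤ estado.length) :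
    scanA estado i ≤ estado.length := by
  rw [scanA]
  split
  · next h' => exact scanA_le estado (i + 1) h'.1
  · exact h
termination_by estado.length - i
decreasing_by simp_all; omega

theorem scanA_stop (estado : List Int) (i : Nat) (hi : i ≤ estado.length) :
    scanA estado i = estado.length ∨
      PySem.List.pyGetD estado ((scanA estado i : Nat) : Int) 0 ≠ 1 := by
  by_cases h : i < estado.length ∧ PySem.List.pyGetD estado (i : Int) 0 = 1
  · have hs : scanA estado i = scanA estado (i + 1) := by rw [scanA, dif_pos h]
    rw [hs]; exact scanA_stop estado (i + 1) h.1
  · have hs : scanA estado i = i := by rw [scanA, dif_neg h]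
    rw [hs]
    rcases Nat.lt_or_ge i estado.length with hlt | hge
    · exact Or.inr (fun hc => h ⟨hlt, hc⟩)
    · left; omega
termination_by estado.length - i
decreasing_by simp_all; omega

theorem loopA_acc (estado : List Int) (i : Nat) (acc : List (Int × Int)) :
    loopA estado i acc = acc ++ loopA estado i [] := by
  by_cases h : i < estado.length
  · by_cases h1 : PySem.List.pyGetD estado (i : Int) 0 = 1
    · rw [loopA, dif_pos h, dif_pos h1]
      conv_rhs => rw [loopA, dif_pos h, dif_pos h1]
      rw [loopA_acc estado (scanA estado i) (acc ++ _),
          loopA_acc estado (scanA estado i) ([] ++ _)]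
      simp
    · rw [loopA, dif_pos h, dif_neg h1]
      conv_rhs => rw [loopA, dif_pos h, dif_neg h1]
      exact loopA_acc estado (i + 1) acc
  · rw [loopA, dif_neg h]; conv_rhs => rw [loopA, dif_neg h]
    simp
termination_by estado.length - i
decreasing_by all_goals first
  | omega
  | (have := scanA_gt estado i ⟨h, h1⟩; omega)

-- inside a run: the start list is unchanged up to the run's stop index, and the end
-- list carries exactly the run's last position
theorem runB (estado : List Int) (k : Nat) (hk1 : 1 ≤ k) (hkn : k < estado.length)
    (hprev : PySem.List.pyGetD estado ((k : Int) - 1) 0 = 1)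
    (hcur : PySem.List.pyGetD estado (k : Int) 0 = 1) :
    SL estado k = SL estado (scanA estado k) ∧
      EL estado k = (((scanA estado k : Nat) : Int) - 1) :: EL estado (scanA estado k) := by
  have hlt : (k : Int) < (estado.length : Int) := by exact_mod_cast hkn
  have hsc : scanA estado k = scanA estado (k + 1) := by rw [scanA, dif_pos ⟨hkn, hcur⟩]
  have hcsF : condS estado (k : Int) = false := by
    have h0 : k ≠ 0 := by omega
    simp [condS, hprev, h0]
  have hSpeel : SL estado k = SL estado (k + 1) := by
    rw [SL, PySem.List.pyRange_one_cons hlt, List.filter_cons_of_neg (by simp [hcsF]),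
        show ((k : Int) + 1) = ((k + 1 : Nat) : Int) by push_cast; ring, SL]
  by_cases hend : (k + 1 = estado.length) ∨ PySem.List.pyGetD estado ((k : Int) + 1) 0 ≠ 1
  · have hstop : scanA estado (k + 1) = k + 1 := by
      rw [scanA, dif_neg]
      rintro ⟨ha, hb⟩
      rcases hend with he | he
      · omega
      · exact he (by rw [show (((k + 1 : Nat)) : Int) = (k : Int) + 1 by push_cast; ring] at hb; exact hb)
    have hceT : condE estado (estado.length : Int) (k : Int) = true := by
      rcases hend with he | he
      · simp [condE, hcur]; left; omega
      · simp [condE, hcur]; right; exact he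
    have hEpeel : EL estado k = (k : Int) :: EL estado (k + 1) := by
      rw [EL, PySem.List.pyRange_one_cons hlt, List.filter_cons_of_pos (by simp [hceT]),
          show ((k : Int) + 1) = ((k + 1 : Nat) : Int) by push_cast; ring, EL]
    refine ⟨?_, ?_⟩
    · rw [hSpeel, hsc, hstop]
    · rw [hEpeel, hsc, hstop,
          show (((k + 1 : Nat)) : Int) - 1 = (k : Int) by push_cast; ring]
  · push Not at hend
    obtain ⟨hne, hval⟩ := hend
    have hkn1 : k + 1 < estado.length := by omega
    have hceF : condE estado (estado.length : Int) (k : Int) = false := by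
      simp [condE, hval]
      omega
    have hEpeel : EL estado k = EL estado (k + 1) := by
      rw [EL, PySem.List.pyRange_one_cons hlt, List.filter_cons_of_neg (by simp [hceF]),
          show ((k : Int) + 1) = ((k + 1 : Nat) : Int) by push_cast; ring, EL]
    have ih := runB estado (k + 1) (by omega) hkn1
      (by rw [show (((k + 1 : Nat)) : Int) - 1 = (k : Int) by push_cast; ring]; exact hcur)
      (by rw [show (((k + 1 : Nat)) : Int) = (k : Int) + 1 by push_cast; ring]; exact hval)
    refine ⟨?_, ?_⟩
    · rw [hSpeel, ih.1, hsc]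
    · rw [hEpeel, ih.2, hsc]
termination_by estado.length - k
decreasing_by omega

-- main invariant: from any position that does not continue a run, zipping the
-- remaining starts and ends equals A's outer loop
theorem mainL (estado : List Int) (i : Nat) (hi : i ≤ estado.length)
    (H : PySem.List.pyGetD estado (i : Int) 0 = 1 →
         ((i : Int) = 0 ∨ PySem.List.pyGetD estado ((i : Int) - 1) 0 ≠ 1)) :
    (SL estado i).zip (EL estado i) = loopA estado i [] := by
  by_cases h : i < estado.length
  · have hlt : (i : Int) < (estado.length : Int) := by exact_mod_cast h
    by_cases h1 : PySem.List.pyGetD estado (i : Int) 0 = 1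
    · have h1' : estado[i]?.getD 0 = 1 := by simpa using h1
      have hcsT : condS estado (i : Int) = true := by
        rcases H h1 with h0 | h0
        · have hi0 : i = 0 := by exact_mod_cast h0
          subst hi0
          simp [condS, PySem.List.pyGetD_zero, List.getD_eq_getElem?_getD, h1']
        · simp [condS, h1', h0]
      have hSpeel : SL estado i = (i : Int) :: SL estado (i + 1) := by
        rw [SL, PySem.List.pyRange_one_cons hlt, List.filter_cons_of_pos (by simp [hcsT]),
            show ((i : Int) + 1) = ((i + 1 : Nat) : Int) by push_cast; ring, SL]
      have hsc : scanA estado i = scanA estado (i + 1) := by rw [scanA, dif_pos ⟨h, h1⟩]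
      have hij : i < scanA estado i := scanA_gt estado i ⟨h, h1⟩
      have hjn : scanA estado i ≤ estado.length := scanA_le estado i hi
      have Hj : PySem.List.pyGetD estado ((scanA estado i : Nat) : Int) 0 = 1 →
          (((scanA estado i : Nat) : Int) = 0 ∨
            PySem.List.pyGetD estado (((scanA estado i : Nat) : Int) - 1) 0 ≠ 1) := by
        intro hc
        rcases scanA_stop estado i hi with hs | hs
        · exfalso
          have : PySem.List.pyGetD estado ((estado.length : Nat) : Int) 0 = 0 := by
            simp [PySem.List.pyGetD, PySem.List.pyGet?, PySem.List.pyIdx?]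
          rw [hs] at hc; simp_all
        · exact absurd hc hs
      have hrec := mainL estado (scanA estado i) hjn Hj
      have hloop : loopA estado i [] =
          ((i : Int), ((scanA estado i : Nat) : Int) - 1) :: loopA estado (scanA estado i) [] := by
        rw [loopA, dif_pos h, dif_pos h1]
        rw [loopA_acc estado (scanA estado i)]
        simp
      by_cases hend : (i + 1 = estado.length) ∨ PySem.List.pyGetD estado ((i : Int) + 1) 0 ≠ 1
      · -- i is the last element of its run: scanA stops at i+1
        have hstop : scanA estado (i + 1) = i + 1 := by
          rw [scanA, dif_neg]
          rintro ⟨ha, hb⟩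
          rcases hend with he | he
          · omega
          · exact he (by rw [show (((i + 1 : Nat)) : Int) = (i : Int) + 1 by push_cast; ring] at hb; exact hb)
        have hceT : condE estado (estado.length : Int) (i : Int) = true := by
          rcases hend with he | he
          · simp [condE, h1]; left; omega
          · simp [condE, h1]; right; exact he
        have hEpeel : EL estado i = (i : Int) :: EL estado (i + 1) := by
          rw [EL, PySem.List.pyRange_one_cons hlt, List.filter_cons_of_pos (by simp [hceT]),
              show ((i : Int) + 1) = ((i + 1 : Nat) : Int) by push_cast; ring, EL]
        rw [hSpeel, hEpeel, List.zip_cons_cons, hloop]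
        rw [hsc, hstop] at hrec ⊢
        rw [hrec]
        congr 2
        push_cast; ring
      · push Not at hend
        obtain ⟨hne, hval⟩ := hend
        have hceF : condE estado (estado.length : Int) (i : Int) = false := by
          simp [condE, hval]
          omega
        have hEpeel : EL estado i = EL estado (i + 1) := by
          rw [EL, PySem.List.pyRange_one_cons hlt, List.filter_cons_of_neg (by simp [hceF]),
              show ((i : Int) + 1) = ((i + 1 : Nat) : Int) by push_cast; ring, EL]
        have hrun := runB estado (i + 1) (by omega) (by omega)
          (by rw [show (((i + 1 : Nat)) : Int) - 1 = (i : Int) by push_cast; ring]; exact h1)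
          (by rw [show (((i + 1 : Nat)) : Int) = (i : Int) + 1 by push_cast; ring]; exact hval)
        rw [hSpeel, hEpeel, hrun.2, hrun.1, ← hsc, List.zip_cons_cons, hloop, hrec]
    · have h1' : ¬ estado[i]?.getD 0 = 1 := by simpa using h1
      have hcsF : condS estado (i : Int) = false := by simp [condS, h1']
      have hceF : condE estado (estado.length : Int) (i : Int) = false := by
        simp [condE, h1']
      have hSpeel : SL estado i = SL estado (i + 1) := by
        rw [SL, PySem.List.pyRange_one_cons hlt, List.filter_cons_of_neg (by simp [hcsF]),
            show ((i : Int) + 1) = ((i + 1 : Nat) : Int) by push_cast; ring, SL]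
      have hEpeel : EL estado i = EL estado (i + 1) := by
        rw [EL, PySem.List.pyRange_one_cons hlt, List.filter_cons_of_neg (by simp [hceF]),
            show ((i : Int) + 1) = ((i + 1 : Nat) : Int) by push_cast; ring, EL]
      rw [hSpeel, hEpeel, loopA, dif_pos h, dif_neg h1]
      exact mainL estado (i + 1) (by omega) (by
        intro _
        right
        rw [show (((i + 1 : Nat)) : Int) - 1 = (i : Int) by push_cast; ring]
        exact h1)
  · have hin : i = estado.length := by omega
    rw [SL, EL, hin, PySem.List.pyRange_one_eq_nil (le_refl _), loopA,
        dif_neg (lt_irrefl estado.length)]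
    simp
termination_by estado.length - i
decreasing_by all_goals omega

-- ===== VERDICT (by name: the statement is the Claim_ definition above) =====
theorem encontrar_intervalos_spec : Claim_equal_encontrar_intervalos := by
  intro estado _
  unfold Spec_encontrar_intervalos encontrar_intervalos encontrar_intervalos_alt
  have := mainL estado 0 (Nat.zero_le _) (fun _ => Or.inl rfl)
  simpa [SL, EL] using this.symm
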